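-- pv_equiv track=rewrite | github.com/mwiens91/practice-problems | leetcode/1346.check-if-n-and-its-double-exist.py | checkIfExist
-- ===== SOURCE A (Python) =====
-- from collections import Counter
--
-- def checkIfExist(arr: list[int]) -> bool:
--     # Get counts of nums
--     counts = Counter(arr)
--
--     # See if any numbers double is in the counter. For the special
--     # case of zero, we need to make sure there at least two of them.
--     for num in counts:
--         if num != 0:
--             if 2 * num in counts:
--                 return True
--         else:
--             if counts[0] >= 2:
--                 return True
--
--     return False
-- ===== SOURCE B (Python) =====
-- def checkIfExist(arr: list[int]) -> bool:
--     # Single incremental pass: for each num, check whether its double or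
--     # (if even) its half has already occurred, then record num.
--     seen = set()
--     for num in arr:
--         if 2 * num in seen or (num % 2 == 0 and num // 2 in seen):
--             return True
--         seen.add(num)
--     return False
-- ===== Notes on version B (the rewrite author's own statement) =====
-- stated objective: idiomatic
-- what changed: Replaces the build-Counter-then-scan-keys approach (with a separate count>=2 special case for zero) by a single incremental pass over arr with a seen-set, checking for each element whether its double or its even half was already seen; zero needs no special case.
import Mathlib
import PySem

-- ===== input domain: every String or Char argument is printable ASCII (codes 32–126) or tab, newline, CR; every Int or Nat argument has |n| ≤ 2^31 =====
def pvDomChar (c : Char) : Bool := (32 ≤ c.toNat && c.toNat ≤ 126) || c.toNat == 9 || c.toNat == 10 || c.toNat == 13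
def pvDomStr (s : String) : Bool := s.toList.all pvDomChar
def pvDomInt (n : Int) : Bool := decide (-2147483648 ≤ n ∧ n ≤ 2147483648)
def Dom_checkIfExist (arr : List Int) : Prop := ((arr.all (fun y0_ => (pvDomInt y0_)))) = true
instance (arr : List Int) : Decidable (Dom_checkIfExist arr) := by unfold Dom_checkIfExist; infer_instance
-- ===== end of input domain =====

-- B replaces A's build-Counter-then-scan-keys approach by a single incremental pass
-- with a seen-set (checking double and even half); same behaviour, no zero special case.


-- ===== PORT A =====
-- counts = Counter(arr); loop over its keys with early returns = List.any over the keys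
def checkIfExist (arr : List Int) : Bool :=
  let counts := PySem.Dict.counter arr
  counts.keys.any (fun num =>
    if num ≠ 0 then counts.contains (2 * num)
    else decide (2 ≤ counts.getD 0 0))

-- ===== PORT B =====
-- the for-loop with early return, seen as an explicit recursion over arr carrying the set
def checkIfExistLoop (seen : PySem.Set Int) : List Int → Bool
  | [] => false
  | num :: rest =>
    if PySem.Set.contains seen (2 * num)
        || (PySem.Int.mod num 2 == 0 && PySem.Set.contains seen (PySem.Int.floordiv num 2)) then
      true
    else
      checkIfExistLoop (PySem.Set.add seen num) rest

def checkIfExist_alt (arr : List Int) : Bool :=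
  checkIfExistLoop PySem.Set.empty arr

-- ===== PRECONDITION & SPEC =====
def Spec_checkIfExist (arr : List Int) (out : Bool) : Prop := out = checkIfExist_alt arr
instance (arr : List Int) (out : Bool) : Decidable (Spec_checkIfExist arr out) := by unfold Spec_checkIfExist; infer_instance

-- ===== CLAIM (what is proved, stated in full; the proofs are below) =====
def Claim_equal_checkIfExist : Prop := ∀ (arr : List Int), Dom_checkIfExist arr → Spec_checkIfExist arr (checkIfExist arr)

-- ===== LEMMAS AND PROOFS =====

-- the common characterisation: some nonzero element has its double present, or 0 occurs twice
def PairProp (arr : List Int) : Prop :=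
  (∃ b ∈ arr, b ≠ 0 ∧ 2 * b ∈ arr) ∨ 2 ≤ arr.count 0

theorem A_iff (arr : List Int) : checkIfExist arr = true ↔ PairProp arr := by
  simp only [checkIfExist, List.any_eq_true, PySem.Dict.keys_counter,
    PySem.Set.mem_ofList, PySem.Dict.contains_counter, PySem.Dict.getD_counter, PairProp]
  constructor
  · rintro ⟨num, hmem, h⟩
    by_cases h0 : num = 0
    · subst h0
      rw [if_neg (by simp)] at h
      right
      exact_mod_cast of_decide_eq_true h
    · rw [if_pos h0] at h
      exact Or.inl ⟨num, hmem, h0, by simpa using h⟩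
  · rintro (⟨b, hb, hb0, hdb⟩ | h2)
    · exact ⟨b, hb, by rw [if_pos hb0]; simpa using hdb⟩
    · have h0 : (0 : Int) ∈ arr := List.count_pos_iff.mp (by omega)
      refine ⟨0, h0, ?_⟩
      rw [if_neg (by simp)]
      exact decide_eq_true (by exact_mod_cast h2)

-- what the B loop returns, as a statement about a split of the remaining list
def SB (pre rest : List Int) : Prop :=
  ∃ l num r, rest = l ++ num :: r ∧
    (2 * num ∈ pre ++ l ∨ ∃ m ∈ pre ++ l, num = 2 * m)

theorem loop_iff (rest : List Int) :
    ∀ (seen : PySem.Set Int) (pre : List Int), (∀ x, x ∈ seen ↔ x ∈ pre) →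
    (checkIfExistLoop seen rest = true ↔ SB pre rest) := by
  induction rest with
  | nil =>
    intro seen pre hmem
    simp [checkIfExistLoop, SB]
  | cons x rs ih =>
    intro seen pre hmem
    have hcond : (PySem.Set.contains seen (2 * x)
        || (PySem.Int.mod x 2 == 0 && PySem.Set.contains seen (PySem.Int.floordiv x 2))) = true
        ↔ (2 * x ∈ pre ∨ ∃ m ∈ pre, x = 2 * m) := by
      simp only [Bool.or_eq_true, Bool.and_eq_true, beq_iff_eq, PySem.Set.contains_iff, hmem]
      constructor
      · rintro (h | ⟨hmod, hdiv⟩)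
        · exact Or.inl h
        · refine Or.inr ⟨PySem.Int.floordiv x 2, hdiv, ?_⟩
          rw [PySem.Int.floordiv_eq_ediv_of_pos (by omega)]
          rw [PySem.Int.mod_eq_emod_of_pos (by omega)] at hmod
          omega
      · rintro (h | ⟨m, hm, hx⟩)
        · exact Or.inl h
        · refine Or.inr ⟨?_, ?_⟩
          · rw [PySem.Int.mod_eq_emod_of_pos (by omega)]; omega
          · have : PySem.Int.floordiv x 2 = m := by
              rw [PySem.Int.floordiv_eq_ediv_of_pos (by omega)]; omega
            rw [this]; exact hm
    have hmem' : ∀ y, y ∈ PySem.Set.add seen x ↔ y ∈ pre ++ [x] := by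
      intro y; simp [PySem.Set.mem_add, hmem]
    constructor
    · intro h
      rw [checkIfExistLoop] at h
      split at h
      · rename_i hc
        rcases hcond.mp hc with h' | h'
        · exact ⟨[], x, rs, by simp, Or.inl (by simpa using h')⟩
        · exact ⟨[], x, rs, by simp, Or.inr (by simpa using h')⟩
      · rcases (ih _ _ hmem').mp h with ⟨l, num, r, heq, hd⟩
        refine ⟨x :: l, num, r, by simp [heq], ?_⟩
        have : (pre ++ [x]) ++ l = pre ++ (x :: l) := by simp
        rw [this] at hd
        exact hd
    · rintro ⟨l, num, r, heq, hd⟩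
      rw [checkIfExistLoop]
      split
      · rfl
      · rename_i hc
        cases l with
        | nil =>
          simp at heq
          obtain ⟨hx, hrs⟩ := heq
          subst hx
          exfalso
          apply hc
          apply hcond.mpr
          simpa using hd
        | cons y l' =>
          simp at heq
          obtain ⟨hy, hrs⟩ := heq
          subst hy
          apply (ih _ _ hmem').mpr
          refine ⟨l', num, r, hrs ▸ rfl, ?_⟩
          have : (pre ++ [x]) ++ l' = pre ++ (x :: l') := by simp
          rw [this]
          exact hd

theorem B_iff (arr : List Int) : checkIfExist_alt arr = true ↔ SB [] arr := by
  exact loop_iff arr PySem.Set.empty [] (by intro x; simp [PySem.Set.empty])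

theorem two_mem_split {a c : Int} {arr : List Int} (hne : a ≠ c)
    (ha : a ∈ arr) (hc : c ∈ arr) :
    ∃ l x r, arr = l ++ x :: r ∧ ((x = a ∧ c ∈ l) ∨ (x = c ∧ a ∈ l)) := by
  induction arr with
  | nil => simp at ha
  | cons y ys ih =>
    by_cases ha' : a ∈ ys
    · by_cases hc' : c ∈ ys
      · obtain ⟨l, x, r, heq, hd⟩ := ih ha' hc'
        refine ⟨y :: l, x, r, by simp [heq], ?_⟩
        rcases hd with ⟨h1, h2⟩ | ⟨h1, h2⟩
        · exact Or.inl ⟨h1, by simp [h2]⟩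
        · exact Or.inr ⟨h1, by simp [h2]⟩
      · have hcy : c = y := by
          rcases List.mem_cons.mp hc with h | h
          · exact h
          · exact absurd h hc'
        obtain ⟨l, r, heq⟩ := List.append_of_mem ha'
        exact ⟨y :: l, a, r, by simp [heq], Or.inl ⟨rfl, by simp [hcy]⟩⟩
    · have hay : a = y := by
        rcases List.mem_cons.mp ha with h | h
        · exact h
        · exact absurd h ha'
      have hc' : c ∈ ys := by
        rcases List.mem_cons.mp hc with h | h
        · exact absurd (h.trans hay.symm).symm hne
        · exact h
      obtain ⟨l, r, heq⟩ := List.append_of_mem hc'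
      exact ⟨y :: l, c, r, by simp [heq], Or.inr ⟨rfl, by simp [hay]⟩⟩

theorem count_two_split {arr : List Int} (h : 2 ≤ arr.count 0) :
    ∃ l r, arr = l ++ (0 : Int) :: r ∧ (0 : Int) ∈ l := by
  have h0 : (0 : Int) ∈ arr := List.count_pos_iff.mp (by omega)
  obtain ⟨l0, r0, heq⟩ := List.append_of_mem h0
  subst heq
  rw [List.count_append, List.count_cons] at h
  simp at h
  rcases Nat.lt_or_ge 0 (l0.count 0) with hl | hl
  · exact ⟨l0, r0, rfl, List.count_pos_iff.mp hl⟩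
  · have hr : 0 < r0.count 0 := by omega
    obtain ⟨l1, r1, heq1⟩ := List.append_of_mem (List.count_pos_iff.mp hr)
    refine ⟨l0 ++ 0 :: l1, r1, by simp [heq1], by simp⟩

theorem SB_iff_P (arr : List Int) : SB [] arr ↔ PairProp arr := by
  constructor
  · rintro ⟨l, num, r, heq, hd⟩
    simp only [List.nil_append] at hd
    have hnum_mem : num ∈ arr := by rw [heq]; simp
    rcases hd with h1 | ⟨m, hm, hx⟩
    · by_cases h0 : num = 0
      · subst h0
        right
        rw [heq, List.count_append, List.count_cons]
        have : 0 < l.count 0 := List.count_pos_iff.mpr (by simpa using h1)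
        simp; omega
      · exact Or.inl ⟨num, hnum_mem, h0, by rw [heq]; exact List.mem_append_left _ h1⟩
    · by_cases h0 : m = 0
      · subst h0
        right
        rw [heq, List.count_append, List.count_cons]
        have : 0 < l.count 0 := List.count_pos_iff.mpr hm
        simp [hx]; omega
      · refine Or.inl ⟨m, ?_, h0, ?_⟩
        · rw [heq]; exact List.mem_append_left _ hm
        · rw [← hx]; exact hnum_mem
  · rintro (⟨b, hb, hb0, hdb⟩ | h2)
    · have hne : b ≠ 2 * b := by omega
      obtain ⟨l, x, r, heq, hd⟩ := two_mem_split hne hb hdb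
      rcases hd with ⟨hx, hcl⟩ | ⟨hx, hal⟩
      · exact ⟨l, x, r, heq, Or.inl (by simpa [hx] using hcl)⟩
      · exact ⟨l, x, r, heq, Or.inr ⟨b, by simpa using hal, by omega⟩⟩
    · obtain ⟨l, r, heq, hl⟩ := count_two_split h2
      exact ⟨l, 0, r, heq, Or.inl (by simpa using hl)⟩

-- ===== VERDICT (by name: the statement is the Claim_ definition above) =====
theorem checkIfExist_spec : Claim_equal_checkIfExist := by
  intro arr _
  unfold Spec_checkIfExist
  have h : checkIfExist arr = true ↔ checkIfExist_alt arr = true := by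
    rw [A_iff, B_iff, SB_iff_P]
  exact Bool.eq_iff_iff.mpr h
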